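-- pv_equiv track=rewrite | github.com/JuliaGast/counttrucola_submission | rule_based/learn_input_creator.py | get_c_rule_scores_x
-- ===== SOURCE A (Python) =====
-- def get_c_rule_scores_x(dataset, body_t, head_ts, head_exists_t, show, neg_minus1, x, WINDOW_SIZE, RR_OFFSET):
--     """
--     helper function for extend_learn_input_constants_single
--     This function collects the examples for a single entity that has been used as
--     x substitution in the current rule. Some of the parameters are lists some are sets.
--     Its very important that it is like this! Lists are always ordered.
--
--     :param body_t: A list of time steps for which the body of the rule is true for that specific x.
--     :param head_ts: A set of time steps for which the head of the rule is true for that specific x.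
--     :param head_exists_t: A list of time steps for which something is stated w.r.t to x and the head relation of the rule.
--     :param show: If set to True some debugging prints are created. Not used in normal mode.
--     :param neg_minus1: If this is true a negated atom is added to the body, if h(X,c, t) is the head, then !h(X,c, t-1) is the additional body atom.
--     :param x: The x entity for which data is collected (used for debugging prupose only).
--     :param WINDOW_SIZE: See options parameter named LEARN_WINDOW_SIZE
--     :return predictions: delta_t1 : (true predictions, all predictions),  delta_t2 : (true predictions, all predictions), ... }
--     """
--     # some lines are left for debugging purpose which create prints when show is set to True
--     index_b = 0
--     index_h = 0
--     predictions = {}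
--     example_counter = 0
--     while index_h < len(head_exists_t) and head_exists_t[index_h] <= body_t[index_b]:
--         index_h += 1
--     while index_b < len(body_t):
--         bt_current = body_t[index_b]
--         bt_next =  body_t[index_b+1] if index_b+1 < len(body_t) else 10000000 # hope thats high enough, horrible coding ...
--         while index_h < len(head_exists_t) and head_exists_t[index_h] <= bt_next:
--             ht = head_exists_t[index_h]
--             # everthing fine in bt_current and ht
--             delta = ht - bt_current
--             if delta < WINDOW_SIZE and (not(neg_minus1) or not(ht-1 in head_ts)):
--                 if not blocked_by_recurrency(ht, delta, head_ts, RR_OFFSET):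
--                     if not delta in predictions: predictions[delta] = [0,0]
--                     if ht in head_ts: predictions[delta][0] += 1
--                     predictions[delta][1] += 1
--                     example_counter += 1
--             index_h += 1
--         if index_h == len(head_exists_t): break
--         index_b += 1
--     return (predictions, example_counter)
--
-- def blocked_by_recurrency(ht, delta, head_ts, RR_OFFSET):
--     """
--     Helper function which is hard to explain ...
--
--     :param ht: Time step for which the body is true. Time step that is precicted
--     :param delta: Time distance for which the body is true w.r.t ht. Distance to the time step from which is predicted.
--     :param head_ts: A set of time steps for which the head of the rule is true.
--     :param RR_OFFSET: Some offset.
--     :return True if the prediction is blocked, false otherwise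
--     """
--     if RR_OFFSET < 0: return False
--     for d in range(1, delta + RR_OFFSET + 1):
--         if ht - d in head_ts: return True
--     return False
-- ===== SOURCE B (Python) =====
-- def _bisect_left(a, v):
--     lo, hi = 0, len(a)
--     while lo < hi:
--         mid = (lo + hi) // 2
--         if a[mid] < v:
--             lo = mid + 1
--         else:
--             hi = mid
--     return lo
--
-- def get_c_rule_scores_x(dataset, body_t, head_ts, head_exists_t, show, neg_minus1, x, WINDOW_SIZE, RR_OFFSET):
--     # Single pass over head_exists_t with a monotone body pointer; the recurrency
--     # scan is replaced by one bisect range query on sorted head_ts: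
--     # blocked iff some head time lies in [ht-(delta+RR_OFFSET), ht-1].
--     predictions = {}
--     count = 0
--     if not head_exists_t:
--         return predictions, count
--     first = body_t[0]
--     hs = sorted(head_ts)
--     n = len(body_t)
--     ib = 0
--     started = False
--     for ht in head_exists_t:
--         if not started:
--             if ht <= first:
--                 continue
--             started = True
--         while ib + 1 < n and ht > body_t[ib + 1]:
--             ib += 1
--         delta = ht - body_t[ib]
--         if delta < WINDOW_SIZE and (not neg_minus1 or (ht - 1) not in head_ts):
--             if RR_OFFSET < 0 or _bisect_left(hs, ht) <= _bisect_left(hs, ht - (delta + RR_OFFSET)):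
--                 p = predictions.get(delta, [0, 0])
--                 if ht in head_ts:
--                     p[0] += 1
--                 p[1] += 1
--                 predictions[delta] = p
--                 count += 1
--     return predictions, count
-- ===== Notes on version B (the rewrite author's own statement) =====
-- stated objective: alternative
-- what changed: B replaces A's nested two-pointer while-loops plus the per-prediction blocked_by_recurrency scan over range(1, delta+RR_OFFSET+1) with a single pass over head_exists_t that advances the body pointer inline and decides blocking by one bisect range query on sorted head_ts (is some head time in [ht-(delta+RR_OFFSET), ht-1]?), so the cost no longer depends on the magnitude of delta+RR_OFFSET.
-- intended difference: On inputs containing a head-observation time greater than A's hard-coded sentinel 10000000 ('hope thats high enough, horrible coding'), A silently stops and drops that observation and all later ones, returning undercounted predictions, while B keeps matching them against the last body time; B's value is the intended one since the sentinel was only meant to stand for infinity. — e.g. on get_c_rule_scores_x(0, [5], [], [10000001], false, false, 7, 20000000, 0): A returns ([], 0), B returns ([(9999996, [0, 1])], 1)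
import Mathlib
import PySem

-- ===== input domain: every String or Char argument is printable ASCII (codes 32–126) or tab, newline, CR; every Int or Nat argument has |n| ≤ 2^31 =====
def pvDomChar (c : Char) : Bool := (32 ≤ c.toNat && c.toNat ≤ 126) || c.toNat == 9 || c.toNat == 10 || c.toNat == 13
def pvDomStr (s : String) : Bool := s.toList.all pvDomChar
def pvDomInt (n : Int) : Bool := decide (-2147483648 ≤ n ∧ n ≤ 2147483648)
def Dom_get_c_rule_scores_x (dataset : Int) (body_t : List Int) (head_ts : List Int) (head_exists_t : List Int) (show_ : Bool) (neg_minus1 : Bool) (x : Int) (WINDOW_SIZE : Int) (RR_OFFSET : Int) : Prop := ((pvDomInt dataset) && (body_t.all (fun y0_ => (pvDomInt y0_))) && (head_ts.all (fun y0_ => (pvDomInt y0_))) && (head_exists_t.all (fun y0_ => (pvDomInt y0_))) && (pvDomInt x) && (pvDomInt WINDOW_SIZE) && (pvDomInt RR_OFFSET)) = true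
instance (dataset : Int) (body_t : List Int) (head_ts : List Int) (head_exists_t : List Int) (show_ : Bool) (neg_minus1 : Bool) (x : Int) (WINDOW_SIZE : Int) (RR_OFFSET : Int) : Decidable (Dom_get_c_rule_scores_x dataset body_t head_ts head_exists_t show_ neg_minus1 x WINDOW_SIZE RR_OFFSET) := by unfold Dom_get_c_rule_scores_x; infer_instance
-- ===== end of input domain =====

-- B re-implements A's nested two-pointer scan as a single pass over head_exists_t whose
-- recurrency check is a bisect range query on sorted head_ts (alternative algorithm; not measured faster).
-- ===== PORT A =====
-- value update helpers: Python's p[0] += 1 / p[1] += 1 on the two-element count list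
def pvBump0 : List Int → List Int
  | a :: t => (a + 1) :: t
  | [] => []
def pvBump1 : List Int → List Int
  | a :: b :: t => a :: (b + 1) :: t
  | l => l

def blocked_by_recurrency (ht delta : Int) (head_ts : List Int) (RR_OFFSET : Int) : Bool :=
  if RR_OFFSET < 0 then false
  else (PySem.List.pyRange 1 (delta + RR_OFFSET + 1) 1).any (fun d => head_ts.contains (ht - d))

-- first while loop: advance index_h past head times ≤ body_t[0]
def pvASkip (head_exists_t : List Int) (b0 : Int) (ih : Nat) : Nat :=
  if h : ih < head_exists_t.length ∧ head_exists_t.getD ih 0 ≤ b0 then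
    pvASkip head_exists_t b0 (ih + 1)
  else ih
termination_by head_exists_t.length - ih
decreasing_by omega

-- inner while loop over head_exists_t
def pvAInner (head_ts head_exists_t : List Int) (neg_minus1 : Bool)
    (WINDOW_SIZE RR_OFFSET bt_current bt_next : Int)
    (ih : Nat) (pred : PySem.Dict Int (List Int)) (cnt : Int) :
    Nat × PySem.Dict Int (List Int) × Int :=
  if h : ih < head_exists_t.length ∧ head_exists_t.getD ih 0 ≤ bt_next then
    let ht := head_exists_t.getD ih 0
    let delta := ht - bt_current
    let s :=
      if decide (delta < WINDOW_SIZE) && (!neg_minus1 || !head_ts.contains (ht - 1)) then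
        if !blocked_by_recurrency ht delta head_ts RR_OFFSET then
          let pred := if pred.contains delta then pred else pred.insert delta [0, 0]
          let pred := if head_ts.contains ht then pred.modify delta [0, 0] pvBump0 else pred
          let pred := pred.modify delta [0, 0] pvBump1
          (pred, cnt + 1)
        else (pred, cnt)
      else (pred, cnt)
    pvAInner head_ts head_exists_t neg_minus1 WINDOW_SIZE RR_OFFSET bt_current bt_next (ih + 1) s.1 s.2
  else (ih, pred, cnt)
termination_by head_exists_t.length - ih
decreasing_by omega

-- outer while loop over body_t
def pvAOuter (body_t head_ts head_exists_t : List Int) (neg_minus1 : Bool)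
    (WINDOW_SIZE RR_OFFSET : Int) (ib ih : Nat)
    (pred : PySem.Dict Int (List Int)) (cnt : Int) :
    PySem.Dict Int (List Int) × Int :=
  if hb : ib < body_t.length then
    let bt_current := body_t.getD ib 0
    let bt_next := if ib + 1 < body_t.length then body_t.getD (ib + 1) 0 else 10000000
    let r := pvAInner head_ts head_exists_t neg_minus1 WINDOW_SIZE RR_OFFSET bt_current bt_next ih pred cnt
    if r.1 = head_exists_t.length then (r.2.1, r.2.2)
    else pvAOuter body_t head_ts head_exists_t neg_minus1 WINDOW_SIZE RR_OFFSET (ib + 1) r.1 r.2.1 r.2.2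
  else (pred, cnt)
termination_by body_t.length - ib
decreasing_by omega

def get_c_rule_scores_x (dataset : Int) (body_t : List Int) (head_ts : List Int) (head_exists_t : List Int) (show_ : Bool) (neg_minus1 : Bool) (x : Int) (WINDOW_SIZE : Int) (RR_OFFSET : Int) : (List (Int × List Int)) × Int :=
  let ih0 := pvASkip head_exists_t (body_t.getD 0 0) 0
  let r := pvAOuter body_t head_ts head_exists_t neg_minus1 WINDOW_SIZE RR_OFFSET 0 ih0 PySem.Dict.empty 0
  (r.1.items, r.2)

-- ===== PORT B =====
-- B's hand-written bisect_left (Source B cannot import bisect): while lo < hi loop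
def pvBisect (a : List Int) (v : Int) (lo hi : Nat) : Nat :=
  if h : lo < hi then
    let mid := (lo + hi) / 2
    if a.getD mid 0 < v then pvBisect a v (mid + 1) hi
    else pvBisect a v lo mid
  else lo
termination_by hi - lo
decreasing_by all_goals omega

-- B's while loop: advance the body pointer while body_t[ib+1] < ht
def pvBAdvance (body_t : List Int) (ht : Int) (ib : Nat) : Nat :=
  if h : ib + 1 < body_t.length ∧ body_t.getD (ib + 1) 0 < ht then
    pvBAdvance body_t ht (ib + 1)
  else ib
termination_by body_t.length - ib
decreasing_by omega

-- B's single for-loop over head_exists_t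
def pvBGo (body_t head_ts hs : List Int) (neg_minus1 : Bool) (WINDOW_SIZE RR_OFFSET first : Int) :
    List Int → Bool → Nat → PySem.Dict Int (List Int) → Int → PySem.Dict Int (List Int) × Int
  | [], _, _, pred, cnt => (pred, cnt)
  | ht :: rest, started, ib, pred, cnt =>
    if !started && decide (ht ≤ first) then
      pvBGo body_t head_ts hs neg_minus1 WINDOW_SIZE RR_OFFSET first rest started ib pred cnt
    else
      let ib' := pvBAdvance body_t ht ib
      let delta := ht - body_t.getD ib' 0
      let s :=
        if decide (delta < WINDOW_SIZE) && (!neg_minus1 || !head_ts.contains (ht - 1)) then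
          if decide (RR_OFFSET < 0) ||
              decide (pvBisect hs ht 0 hs.length ≤ pvBisect hs (ht - (delta + RR_OFFSET)) 0 hs.length) then
            let p := pred.getD delta [0, 0]
            let p := if head_ts.contains ht then pvBump0 p else p
            (pred.insert delta (pvBump1 p), cnt + 1)
          else (pred, cnt)
        else (pred, cnt)
      pvBGo body_t head_ts hs neg_minus1 WINDOW_SIZE RR_OFFSET first rest true ib' s.1 s.2

def get_c_rule_scores_x_alt (dataset : Int) (body_t : List Int) (head_ts : List Int) (head_exists_t : List Int) (show_ : Bool) (neg_minus1 : Bool) (x : Int) (WINDOW_SIZE : Int) (RR_OFFSET : Int) : (List (Int × List Int)) × Int :=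
  if head_exists_t = [] then ([], 0)
  else
    let first := body_t.getD 0 0
    let hs := PySem.List.sorted head_ts (fun h => h) false
    let r := pvBGo body_t head_ts hs neg_minus1 WINDOW_SIZE RR_OFFSET first head_exists_t false 0 PySem.Dict.empty 0
    (r.1.items, r.2)

-- ===== PRECONDITION & SPEC =====
-- Pre_ excludes only the inputs where Python A raises IndexError: an empty body_t
-- read by body_t[index_b] while head_exists_t is nonempty (B raises there too).
def Pre_get_c_rule_scores_x (dataset : Int) (body_t : List Int) (head_ts : List Int) (head_exists_t : List Int) (show_ : Bool) (neg_minus1 : Bool) (x : Int) (WINDOW_SIZE : Int) (RR_OFFSET : Int) : Prop :=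
  body_t ≠ [] ∨ head_exists_t = []
instance (dataset : Int) (body_t : List Int) (head_ts : List Int) (head_exists_t : List Int) (show_ : Bool) (neg_minus1 : Bool) (x : Int) (WINDOW_SIZE : Int) (RR_OFFSET : Int) : Decidable (Pre_get_c_rule_scores_x dataset body_t head_ts head_exists_t show_ neg_minus1 x WINDOW_SIZE RR_OFFSET) := by unfold Pre_get_c_rule_scores_x; infer_instance

def pvWitness_get_c_rule_scores_x : Int × List Int × List Int × List Int × Bool × Bool × Int × Int × Int :=
  (0, [1, 4], [3, 6], [2, 3, 5, 6], false, false, 7, 5, 0)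

-- On inputs containing a head-observation time greater than A's hard-coded sentinel 10000000
-- ('hope thats high enough, horrible coding'), A silently stops and drops that observation and all
-- later ones, returning undercounted predictions, while B keeps matching them against the last body
-- time; B's value is the intended one since the sentinel was only meant to stand for infinity.
def D_get_c_rule_scores_x (dataset : Int) (body_t : List Int) (head_ts : List Int) (head_exists_t : List Int) (show_ : Bool) (neg_minus1 : Bool) (x : Int) (WINDOW_SIZE : Int) (RR_OFFSET : Int) : Prop :=
  ∃ ht ∈ head_exists_t, 10000000 < ht
instance (dataset : Int) (body_t : List Int) (head_ts : List Int) (head_exists_t : List Int) (show_ : Bool) (neg_minus1 : Bool) (x : Int) (WINDOW_SIZE : Int) (RR_OFFSET : Int) : Decidable (D_get_c_rule_scores_x dataset body_t head_ts head_exists_t show_ neg_minus1 x WINDOW_SIZE RR_OFFSET) := by unfold D_get_c_rule_scores_x; infer_instance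

def Spec_get_c_rule_scores_x (dataset : Int) (body_t : List Int) (head_ts : List Int) (head_exists_t : List Int) (show_ : Bool) (neg_minus1 : Bool) (x : Int) (WINDOW_SIZE : Int) (RR_OFFSET : Int) (out : (List (Int × List Int)) × Int) : Prop := ¬ D_get_c_rule_scores_x dataset body_t head_ts head_exists_t show_ neg_minus1 x WINDOW_SIZE RR_OFFSET → out = get_c_rule_scores_x_alt dataset body_t head_ts head_exists_t show_ neg_minus1 x WINDOW_SIZE RR_OFFSET
instance (dataset : Int) (body_t : List Int) (head_ts : List Int) (head_exists_t : List Int) (show_ : Bool) (neg_minus1 : Bool) (x : Int) (WINDOW_SIZE : Int) (RR_OFFSET : Int) (out : (List (Int × List Int)) × Int) : Decidable (Spec_get_c_rule_scores_x dataset body_t head_ts head_exists_t show_ neg_minus1 x WINDOW_SIZE RR_OFFSET out) := by unfold Spec_get_c_rule_scores_x; infer_instance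

def pvDiffWitness_get_c_rule_scores_x : Int × List Int × List Int × List Int × Bool × Bool × Int × Int × Int :=
  (0, [5], [], [10000001], false, false, 7, 20000000, 0)
def pvDiffWitnessOut_get_c_rule_scores_x : ((List (Int × List Int)) × Int) × ((List (Int × List Int)) × Int) :=
  (([], 0), ([(9999996, [0, 1])], 1))

-- ===== CLAIM (what is proved, stated in full; the proofs are below) =====
def Claim_unchanged_get_c_rule_scores_x : Prop := ∀ (dataset : Int) (body_t : List Int) (head_ts : List Int) (head_exists_t : List Int) (show_ : Bool) (neg_minus1 : Bool) (x : Int) (WINDOW_SIZE : Int) (RR_OFFSET : Int), Dom_get_c_rule_scores_x dataset body_t head_ts head_exists_t show_ neg_minus1 x WINDOW_SIZE RR_OFFSET → Pre_get_c_rule_scores_x dataset body_t head_ts head_exists_t show_ neg_minus1 x WINDOW_SIZE RR_OFFSET → Spec_get_c_rule_scores_x dataset body_t head_ts head_exists_t show_ neg_minus1 x WINDOW_SIZE RR_OFFSET (get_c_rule_scores_x dataset body_t head_ts head_exists_t show_ neg_minus1 x WINDOW_SIZE RR_OFFSET)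
def Claim_changed_get_c_rule_scores_x : Prop := Dom_get_c_rule_scores_x (pvDiffWitness_get_c_rule_scores_x.1) (pvDiffWitness_get_c_rule_scores_x.2.1) (pvDiffWitness_get_c_rule_scores_x.2.2.1) (pvDiffWitness_get_c_rule_scores_x.2.2.2.1) (pvDiffWitness_get_c_rule_scores_x.2.2.2.2.1) (pvDiffWitness_get_c_rule_scores_x.2.2.2.2.2.1) (pvDiffWitness_get_c_rule_scores_x.2.2.2.2.2.2.1) (pvDiffWitness_get_c_rule_scores_x.2.2.2.2.2.2.2.1) (pvDiffWitness_get_c_rule_scores_x.2.2.2.2.2.2.2.2) ∧ Pre_get_c_rule_scores_x (pvDiffWitness_get_c_rule_scores_x.1) (pvDiffWitness_get_c_rule_scores_x.2.1) (pvDiffWitness_get_c_rule_scores_x.2.2.1) (pvDiffWitness_get_c_rule_scores_x.2.2.2.1) (pvDiffWitness_get_c_rule_scores_x.2.2.2.2.1) (pvDiffWitness_get_c_rule_scores_x.2.2.2.2.2.1) (pvDiffWitness_get_c_rule_scores_x.2.2.2.2.2.2.1) (pvDiffWitness_get_c_rule_scores_x.2.2.2.2.2.2.2.1) (pvDiffWitness_get_c_rule_scores_x.2.2.2.2.2.2.2.2)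 ∧ D_get_c_rule_scores_x (pvDiffWitness_get_c_rule_scores_x.1) (pvDiffWitness_get_c_rule_scores_x.2.1) (pvDiffWitness_get_c_rule_scores_x.2.2.1) (pvDiffWitness_get_c_rule_scores_x.2.2.2.1) (pvDiffWitness_get_c_rule_scores_x.2.2.2.2.1) (pvDiffWitness_get_c_rule_scores_x.2.2.2.2.2.1) (pvDiffWitness_get_c_rule_scores_x.2.2.2.2.2.2.1) (pvDiffWitness_get_c_rule_scores_x.2.2.2.2.2.2.2.1) (pvDiffWitness_get_c_rule_scores_x.2.2.2.2.2.2.2.2) ∧ get_c_rule_scores_x (pvDiffWitness_get_c_rule_scores_x.1) (pvDiffWitness_get_c_rule_scores_x.2.1) (pvDiffWitness_get_c_rule_scores_x.2.2.1) (pvDiffWitness_get_c_rule_scores_x.2.2.2.1) (pvDiffWitness_get_c_rule_scores_x.2.2.2.2.1) (pvDiffWitness_get_c_rule_scores_x.2.2.2.2.2.1) (pvDiffWitness_get_c_rule_scores_x.2.2.2.2.2.2.1) (pvDiffWitness_get_c_rule_scores_x.2.2.2.2.2.2.2.1) (pvDiffWitness_get_c_rule_scores_x.2.2.2.2.2.2.2.2)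 = pvDiffWitnessOut_get_c_rule_scores_x.1 ∧ get_c_rule_scores_x_alt (pvDiffWitness_get_c_rule_scores_x.1) (pvDiffWitness_get_c_rule_scores_x.2.1) (pvDiffWitness_get_c_rule_scores_x.2.2.1) (pvDiffWitness_get_c_rule_scores_x.2.2.2.1) (pvDiffWitness_get_c_rule_scores_x.2.2.2.2.1) (pvDiffWitness_get_c_rule_scores_x.2.2.2.2.2.1) (pvDiffWitness_get_c_rule_scores_x.2.2.2.2.2.2.1) (pvDiffWitness_get_c_rule_scores_x.2.2.2.2.2.2.2.1) (pvDiffWitness_get_c_rule_scores_x.2.2.2.2.2.2.2.2) = pvDiffWitnessOut_get_c_rule_scores_x.2 ∧ pvDiffWitnessOut_get_c_rule_scores_x.1 ≠ pvDiffWitnessOut_get_c_rule_scores_x.2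

-- ===== LEMMAS AND PROOFS =====

-- proof-only named forms of the two per-head update steps
def pvStepA (head_ts : List Int) (neg_minus1 : Bool) (WINDOW_SIZE RR_OFFSET bt ht : Int)
    (pred : PySem.Dict Int (List Int)) (cnt : Int) : PySem.Dict Int (List Int) × Int :=
  let delta := ht - bt
  if decide (delta < WINDOW_SIZE) && (!neg_minus1 || !head_ts.contains (ht - 1)) then
    if !blocked_by_recurrency ht delta head_ts RR_OFFSET then
      let pred := if pred.contains delta then pred else pred.insert delta [0, 0]
      let pred := if head_ts.contains ht then pred.modify delta [0, 0] pvBump0 else pred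
      let pred := pred.modify delta [0, 0] pvBump1
      (pred, cnt + 1)
    else (pred, cnt)
  else (pred, cnt)

def pvStepB (head_ts hs : List Int) (neg_minus1 : Bool) (WINDOW_SIZE RR_OFFSET bt ht : Int)
    (pred : PySem.Dict Int (List Int)) (cnt : Int) : PySem.Dict Int (List Int) × Int :=
  let delta := ht - bt
  if decide (delta < WINDOW_SIZE) && (!neg_minus1 || !head_ts.contains (ht - 1)) then
    if decide (RR_OFFSET < 0) ||
        decide (pvBisect hs ht 0 hs.length ≤ pvBisect hs (ht - (delta + RR_OFFSET)) 0 hs.length) then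
      let p := pred.getD delta [0, 0]
      let p := if head_ts.contains ht then pvBump0 p else p
      (pred.insert delta (pvBump1 p), cnt + 1)
    else (pred, cnt)
  else (pred, cnt)

theorem pvBisect_eq_countP (a : List Int) (v : Int) (ha : a.Pairwise (· ≤ ·)) (lo hi : Nat)
    (hhi : hi ≤ a.length) (h1 : lo ≤ a.countP (fun h => decide (h < v)))
    (h2 : a.countP (fun h => decide (h < v)) ≤ hi) :
    pvBisect a v lo hi = a.countP (fun h => decide (h < v)) := by
  rw [pvBisect]
  by_cases h : lo < hi
  · rw [dif_pos h]
    have hmid : (lo + hi) / 2 < a.length := by omega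
    have hsplit : ∀ n, a.countP (fun h => decide (h < v)) =
        (a.take n).countP (fun h => decide (h < v)) + (a.drop n).countP (fun h => decide (h < v)) := by
      intro n
      conv_lhs => rw [← List.take_append_drop n a]
      rw [List.countP_append]
    show (if a.getD ((lo + hi) / 2) 0 < v then pvBisect a v ((lo + hi) / 2 + 1) hi
          else pvBisect a v lo ((lo + hi) / 2)) = _
    by_cases hm : a.getD ((lo + hi) / 2) 0 < v
    · rw [if_pos hm]
      rw [List.getD_eq_getElem _ _ hmid] at hm
      have hall : (a.take ((lo + hi) / 2 + 1)).countP (fun h => decide (h < v)) = (lo + hi) / 2 + 1 := by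
        have := List.countP_eq_length (l := a.take ((lo + hi) / 2 + 1)) (p := fun h => decide (h < v))
        rw [List.length_take] at this
        rw [this.mpr]
        · omega
        · intro x hx
          obtain ⟨j, hj, rfl⟩ := List.mem_take_iff_getElem.mp hx
          simp only [decide_eq_true_eq]
          rcases Nat.lt_or_ge j ((lo + hi) / 2) with hj2 | hj2
          · have := List.pairwise_iff_getElem.mp ha j ((lo + hi) / 2) (by omega) hmid hj2
            omega
          · have : j = (lo + hi) / 2 := by omega
            subst this
            exact hm
      have hk : (lo + hi) / 2 < a.countP (fun h => decide (h < v)) := by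
        have := hsplit ((lo + hi) / 2 + 1)
        omega
      exact pvBisect_eq_countP a v ha ((lo + hi) / 2 + 1) hi hhi (by omega) h2
    · rw [if_neg hm]
      rw [List.getD_eq_getElem _ _ hmid] at hm
      have hzero : (a.drop ((lo + hi) / 2)).countP (fun h => decide (h < v)) = 0 := by
        rw [List.countP_eq_zero]
        intro x hx
        obtain ⟨j, hj, rfl⟩ := List.mem_drop_iff_getElem.mp hx
        simp only [decide_eq_true_eq, not_lt]
        rcases Nat.eq_zero_or_pos j with hj0 | hj0
        · subst hj0
          simpa using not_lt.mp hm
        · have := List.pairwise_iff_getElem.mp ha ((lo + hi) / 2) ((lo + hi) / 2 + j)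
            hmid (by omega) (by omega)
          omega
      have hk : a.countP (fun h => decide (h < v)) ≤ (lo + hi) / 2 := by
        have hs := hsplit ((lo + hi) / 2)
        have hle : (a.take ((lo + hi) / 2)).countP (fun h => decide (h < v)) ≤ (lo + hi) / 2 := by
          calc (a.take ((lo + hi) / 2)).countP (fun h => decide (h < v)) ≤ (a.take ((lo + hi) / 2)).length :=
              List.countP_le_length
            _ ≤ (lo + hi) / 2 := by rw [List.length_take]; omega
        omega
      exact pvBisect_eq_countP a v ha lo ((lo + hi) / 2) (by omega) h1 hk
  · rw [dif_neg h]
    omega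
termination_by hi - lo
decreasing_by all_goals omega

theorem pvCount_split (a : List Int) (lo v : Int) (h : lo ≤ v) :
    a.countP (fun h' => decide (h' < v)) =
    a.countP (fun h' => decide (h' < lo)) + a.countP (fun h' => decide (lo ≤ h') && decide (h' < v)) := by
  induction a with
  | nil => simp
  | cons x t ih =>
    simp only [List.countP_cons, ih]
    by_cases c1 : x < v <;> by_cases c2 : x < lo <;> by_cases c3 : lo ≤ x <;>
      simp [c1, c2, c3] <;> omega

theorem pvCount_window (a : List Int) (lo v : Int) :
    a.countP (fun h' => decide (h' < lo)) < a.countP (fun h' => decide (h' < v)) ↔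
    ∃ h' ∈ a, lo ≤ h' ∧ h' < v := by
  by_cases hlv : lo ≤ v
  · rw [pvCount_split a lo v hlv]
    rw [Nat.lt_add_right_iff_pos, List.countP_pos_iff]
    simp
  · constructor
    · intro hc
      have hmono : a.countP (fun h' => decide (h' < v)) ≤ a.countP (fun h' => decide (h' < lo)) :=
        List.countP_mono_left (fun x _ hx => by simp only [decide_eq_true_eq] at hx ⊢; omega)
      omega
    · rintro ⟨h', _, h1, h2⟩
      omega

-- the blocking scan over range(1, delta+RR_OFFSET+1) equals B's bisect range query on sorted head_ts
theorem pvNotBlocked_eq (ht delta RR_OFFSET : Int) (head_ts : List Int) :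
    (!blocked_by_recurrency ht delta head_ts RR_OFFSET) =
    (decide (RR_OFFSET < 0) ||
      decide (pvBisect (PySem.List.sorted head_ts (fun h => h) false) ht 0
          (PySem.List.sorted head_ts (fun h => h) false).length ≤
        pvBisect (PySem.List.sorted head_ts (fun h => h) false) (ht - (delta + RR_OFFSET)) 0
          (PySem.List.sorted head_ts (fun h => h) false).length)) := by
  have hpw : (PySem.List.sorted head_ts (fun h => h) false).Pairwise (· ≤ ·) := by
    simpa using PySem.List.sorted_pairwise head_ts (fun h => h)
  have hperm : (PySem.List.sorted head_ts (fun h => h) false).Perm head_ts :=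
    PySem.List.sorted_perm _ _ _
  have hb : ∀ v : Int, pvBisect (PySem.List.sorted head_ts (fun h => h) false) v 0
      (PySem.List.sorted head_ts (fun h => h) false).length =
      (PySem.List.sorted head_ts (fun h => h) false).countP (fun h' => decide (h' < v)) := fun v =>
    pvBisect_eq_countP _ v hpw 0 _ le_rfl (Nat.zero_le _) List.countP_le_length
  have key : (PySem.List.pyRange 1 (delta + RR_OFFSET + 1) 1).any (fun d => head_ts.contains (ht - d)) =
      decide ((PySem.List.sorted head_ts (fun h => h) false).countP
          (fun h' => decide (h' < ht - (delta + RR_OFFSET))) <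
        (PySem.List.sorted head_ts (fun h => h) false).countP (fun h' => decide (h' < ht))) := by
    rw [Bool.eq_iff_iff, decide_eq_true_eq, pvCount_window]
    simp only [List.any_eq_true, PySem.List.mem_pyRange_one, List.contains_iff_mem,
      decide_eq_true_eq]
    constructor
    · rintro ⟨d, ⟨h1, h2⟩, hmem⟩
      exact ⟨ht - d, hperm.mem_iff.mpr hmem, by omega, by omega⟩
    · rintro ⟨h, hmem, h1, h2⟩
      exact ⟨ht - h, ⟨by omega, by omega⟩, by simpa using hperm.mem_iff.mp hmem⟩
  unfold blocked_by_recurrency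
  by_cases hrr : RR_OFFSET < 0
  · simp [hrr]
  · rw [if_neg hrr, hb, hb, key]
    rw [Bool.eq_iff_iff]
    simp [hrr]

theorem pvUpd_eq (pred : PySem.Dict Int (List Int)) (delta : Int) (hit : Bool) :
    (let d1 := if pred.contains delta then pred else pred.insert delta [0, 0]
     let d2 := if hit then d1.modify delta [0, 0] pvBump0 else d1
     d2.modify delta [0, 0] pvBump1) =
    pred.insert delta (pvBump1 (if hit then pvBump0 (pred.getD delta [0, 0]) else pred.getD delta [0, 0])) := by
  have hmod : ∀ (d : PySem.Dict Int (List Int)) (k : Int) (f : List Int → List Int),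
      d.modify k [0, 0] f = d.insert k (f (d.getD k [0, 0])) := fun _ _ _ => rfl
  by_cases hc : pred.contains delta
  · cases hit <;>
      simp [hc, hmod, PySem.Dict.getD_insert_self, PySem.Dict.insert_insert_self]
  · have h0 : pred.getD delta [0, 0] = [0, 0] :=
      PySem.Dict.getD_of_not_contains pred _ (by simpa using hc)
    cases hit <;>
      simp [hc, hmod, h0, PySem.Dict.getD_insert_self, PySem.Dict.insert_insert_self]

theorem pvStep_eq (head_ts : List Int) (neg_minus1 : Bool) (WINDOW_SIZE RR_OFFSET bt ht : Int)
    (pred : PySem.Dict Int (List Int)) (cnt : Int) :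
    pvStepA head_ts neg_minus1 WINDOW_SIZE RR_OFFSET bt ht pred cnt =
    pvStepB head_ts (PySem.List.sorted head_ts (fun h => h) false) neg_minus1 WINDOW_SIZE RR_OFFSET bt ht pred cnt := by
  unfold pvStepA pvStepB
  simp only [pvNotBlocked_eq]
  have hupd := pvUpd_eq pred (ht - bt) (head_ts.contains ht)
  simp at hupd
  simp [hupd]

theorem pvAInner_stop (head_ts head_exists_t : List Int) (neg_minus1 : Bool)
    (WINDOW_SIZE RR_OFFSET bt_current bt_next : Int) (ih : Nat) (pred : PySem.Dict Int (List Int)) (cnt : Int)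
    (h : ¬ (ih < head_exists_t.length ∧ head_exists_t.getD ih 0 ≤ bt_next)) :
    pvAInner head_ts head_exists_t neg_minus1 WINDOW_SIZE RR_OFFSET bt_current bt_next ih pred cnt = (ih, pred, cnt) := by
  rw [pvAInner]
  exact dif_neg h

theorem pvAInner_step (head_ts head_exists_t : List Int) (neg_minus1 : Bool)
    (WINDOW_SIZE RR_OFFSET bt_current bt_next : Int) (ih : Nat) (pred : PySem.Dict Int (List Int)) (cnt : Int)
    (h : ih < head_exists_t.length ∧ head_exists_t.getD ih 0 ≤ bt_next) :
    pvAInner head_ts head_exists_t neg_minus1 WINDOW_SIZE RR_OFFSET bt_current bt_next ih pred cnt =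
    pvAInner head_ts head_exists_t neg_minus1 WINDOW_SIZE RR_OFFSET bt_current bt_next (ih + 1)
      (pvStepA head_ts neg_minus1 WINDOW_SIZE RR_OFFSET bt_current (head_exists_t.getD ih 0) pred cnt).1
      (pvStepA head_ts neg_minus1 WINDOW_SIZE RR_OFFSET bt_current (head_exists_t.getD ih 0) pred cnt).2 := by
  rw [pvAInner]
  rw [dif_pos h]
  rfl

theorem pvAOuter_unfold (body_t head_ts head_exists_t : List Int) (neg_minus1 : Bool)
    (WINDOW_SIZE RR_OFFSET : Int) (ib ih : Nat) (pred : PySem.Dict Int (List Int)) (cnt : Int)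
    (hib : ib < body_t.length) :
    pvAOuter body_t head_ts head_exists_t neg_minus1 WINDOW_SIZE RR_OFFSET ib ih pred cnt =
    (if (pvAInner head_ts head_exists_t neg_minus1 WINDOW_SIZE RR_OFFSET (body_t.getD ib 0)
          (if ib + 1 < body_t.length then body_t.getD (ib + 1) 0 else 10000000) ih pred cnt).1 = head_exists_t.length
     then ((pvAInner head_ts head_exists_t neg_minus1 WINDOW_SIZE RR_OFFSET (body_t.getD ib 0)
          (if ib + 1 < body_t.length then body_t.getD (ib + 1) 0 else 10000000) ih pred cnt).2.1,
          (pvAInner head_ts head_exists_t neg_minus1 WINDOW_SIZE RR_OFFSET (body_t.getD ib 0)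
          (if ib + 1 < body_t.length then body_t.getD (ib + 1) 0 else 10000000) ih pred cnt).2.2)
     else pvAOuter body_t head_ts head_exists_t neg_minus1 WINDOW_SIZE RR_OFFSET (ib + 1)
          (pvAInner head_ts head_exists_t neg_minus1 WINDOW_SIZE RR_OFFSET (body_t.getD ib 0)
          (if ib + 1 < body_t.length then body_t.getD (ib + 1) 0 else 10000000) ih pred cnt).1
          (pvAInner head_ts head_exists_t neg_minus1 WINDOW_SIZE RR_OFFSET (body_t.getD ib 0)
          (if ib + 1 < body_t.length then body_t.getD (ib + 1) 0 else 10000000) ih pred cnt).2.1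
          (pvAInner head_ts head_exists_t neg_minus1 WINDOW_SIZE RR_OFFSET (body_t.getD ib 0)
          (if ib + 1 < body_t.length then body_t.getD (ib + 1) 0 else 10000000) ih pred cnt).2.2) := by
  rw [pvAOuter]
  rw [dif_pos hib]

theorem pvBAdvance_stop (body_t : List Int) (ht : Int) (ib : Nat)
    (h : ¬ (ib + 1 < body_t.length ∧ body_t.getD (ib + 1) 0 < ht)) :
    pvBAdvance body_t ht ib = ib := by
  rw [pvBAdvance]; exact dif_neg h

theorem pvBAdvance_step (body_t : List Int) (ht : Int) (ib : Nat)
    (h : ib + 1 < body_t.length ∧ body_t.getD (ib + 1) 0 < ht) :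
    pvBAdvance body_t ht ib = pvBAdvance body_t ht (ib + 1) := by
  rw [pvBAdvance]; exact dif_pos h

theorem pvBGo_cons (body_t head_ts hs : List Int) (neg_minus1 : Bool) (WINDOW_SIZE RR_OFFSET first ht : Int)
    (rest : List Int) (started : Bool) (ib : Nat) (pred : PySem.Dict Int (List Int)) (cnt : Int)
    (h : ¬ (!started && decide (ht ≤ first)) = true) :
    pvBGo body_t head_ts hs neg_minus1 WINDOW_SIZE RR_OFFSET first (ht :: rest) started ib pred cnt =
    pvBGo body_t head_ts hs neg_minus1 WINDOW_SIZE RR_OFFSET first rest true (pvBAdvance body_t ht ib)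
      (pvStepB head_ts hs neg_minus1 WINDOW_SIZE RR_OFFSET (body_t.getD (pvBAdvance body_t ht ib) 0) ht pred cnt).1
      (pvStepB head_ts hs neg_minus1 WINDOW_SIZE RR_OFFSET (body_t.getD (pvBAdvance body_t ht ib) 0) ht pred cnt).2 := by
  rw [pvBGo]
  rw [if_neg h]
  rfl

theorem pvBGo_skip (body_t head_ts hs : List Int) (neg_minus1 : Bool) (WINDOW_SIZE RR_OFFSET first ht : Int)
    (rest : List Int) (ib : Nat) (pred : PySem.Dict Int (List Int)) (cnt : Int)
    (h : ht ≤ first) :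
    pvBGo body_t head_ts hs neg_minus1 WINDOW_SIZE RR_OFFSET first (ht :: rest) false ib pred cnt =
    pvBGo body_t head_ts hs neg_minus1 WINDOW_SIZE RR_OFFSET first rest false ib pred cnt := by
  rw [pvBGo]
  simp [h]

theorem pvMain (body_t head_ts head_exists_t : List Int) (neg_minus1 : Bool)
    (WINDOW_SIZE RR_OFFSET : Int) (ib ih : Nat)
    (pred : PySem.Dict Int (List Int)) (cnt : Int)
    (hib : ib < body_t.length) (hih : ih ≤ head_exists_t.length)
    (hall : ∀ h ∈ head_exists_t, h ≤ 10000000) :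
    pvAOuter body_t head_ts head_exists_t neg_minus1 WINDOW_SIZE RR_OFFSET ib ih pred cnt =
    pvBGo body_t head_ts (PySem.List.sorted head_ts (fun h => h) false) neg_minus1 WINDOW_SIZE RR_OFFSET
      (body_t.getD 0 0) (head_exists_t.drop ih) true ib pred cnt := by
  by_cases hlt : ih < head_exists_t.length
  · have hdrop : head_exists_t.drop ih = head_exists_t.getD ih 0 :: head_exists_t.drop (ih + 1) := by
      rw [List.drop_eq_getElem_cons hlt, List.getD_eq_getElem _ _ hlt]
    have hmem : head_exists_t.getD ih 0 ∈ head_exists_t := by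
      rw [List.getD_eq_getElem _ _ hlt]
      exact List.getElem_mem hlt
    by_cases hle : head_exists_t.getD ih 0 ≤ (if ib + 1 < body_t.length then body_t.getD (ib + 1) 0 else 10000000)
    · rw [pvAOuter_unfold _ _ _ _ _ _ _ _ _ _ hib,
        pvAInner_step _ _ _ _ _ _ _ _ _ _ ⟨hlt, hle⟩,
        ← pvAOuter_unfold _ _ _ _ _ _ _ _ _ _ hib,
        pvMain body_t head_ts head_exists_t neg_minus1 WINDOW_SIZE RR_OFFSET ib (ih + 1) _ _ hib (by omega) hall,
        hdrop, pvBGo_cons _ _ _ _ _ _ _ _ _ _ _ _ _ (by simp)]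
      have hadv : pvBAdvance body_t (head_exists_t.getD ih 0) ib = ib := by
        refine pvBAdvance_stop _ _ _ ?_
        rintro ⟨h1, h2⟩
        rw [if_pos h1] at hle
        omega
      rw [hadv, pvStep_eq]
    · by_cases hlast : ib + 1 < body_t.length
      · rw [pvAOuter_unfold _ _ _ _ _ _ _ _ _ _ hib,
          pvAInner_stop _ _ _ _ _ _ _ _ _ _ (fun hc => hle hc.2),
          if_neg (by omega : ¬ ih = head_exists_t.length),
          pvMain body_t head_ts head_exists_t neg_minus1 WINDOW_SIZE RR_OFFSET (ib + 1) ih pred cnt hlast hih hall,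
          hdrop,
          pvBGo_cons _ _ _ _ _ _ _ _ _ _ _ _ _ (by simp),
          pvBGo_cons _ _ _ _ _ _ _ _ _ _ _ _ _ (by simp)]
        have hstep : pvBAdvance body_t (head_exists_t.getD ih 0) ib =
            pvBAdvance body_t (head_exists_t.getD ih 0) (ib + 1) := by
          refine pvBAdvance_step _ _ _ ⟨hlast, ?_⟩
          rw [if_pos hlast] at hle
          omega
        rw [hstep]
      · exfalso
        rw [if_neg hlast] at hle
        exact hle (hall _ hmem)
  · have hdrop : head_exists_t.drop ih = [] := List.drop_eq_nil_of_le (by omega)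
    rw [pvAOuter_unfold _ _ _ _ _ _ _ _ _ _ hib,
      pvAInner_stop _ _ _ _ _ _ _ _ _ _ (fun hc => hlt hc.1),
      if_pos (by omega : ih = head_exists_t.length), hdrop]
    rfl
termination_by (head_exists_t.length - ih) + (body_t.length - ib)
decreasing_by all_goals omega

theorem pvSkipPhase (body_t head_ts head_exists_t : List Int) (neg_minus1 : Bool)
    (WINDOW_SIZE RR_OFFSET : Int) (ih : Nat)
    (pred : PySem.Dict Int (List Int)) (cnt : Int)
    (hb : body_t ≠ []) (hih : ih ≤ head_exists_t.length)
    (hall : ∀ h ∈ head_exists_t, h ≤ 10000000) :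
    pvAOuter body_t head_ts head_exists_t neg_minus1 WINDOW_SIZE RR_OFFSET 0
      (pvASkip head_exists_t (body_t.getD 0 0) ih) pred cnt =
    pvBGo body_t head_ts (PySem.List.sorted head_ts (fun h => h) false) neg_minus1 WINDOW_SIZE RR_OFFSET
      (body_t.getD 0 0) (head_exists_t.drop ih) false 0 pred cnt := by
  have hb0 : 0 < body_t.length := List.length_pos_iff.mpr hb
  rw [pvASkip]
  by_cases h : ih < head_exists_t.length ∧ head_exists_t.getD ih 0 ≤ body_t.getD 0 0
  · obtain ⟨hlt', _⟩ := id h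
    have hdrop : head_exists_t.drop ih = head_exists_t.getD ih 0 :: head_exists_t.drop (ih + 1) := by
      rw [List.drop_eq_getElem_cons hlt', List.getD_eq_getElem _ _ hlt']
    rw [dif_pos h,
      pvSkipPhase body_t head_ts head_exists_t neg_minus1 WINDOW_SIZE RR_OFFSET (ih + 1) pred cnt hb (by omega) hall,
      hdrop, pvBGo_skip _ _ _ _ _ _ _ _ _ _ _ _ h.2]
  · rw [dif_neg h]
    by_cases hlt : ih < head_exists_t.length
    · have hdrop : head_exists_t.drop ih = head_exists_t.getD ih 0 :: head_exists_t.drop (ih + 1) := by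
        rw [List.drop_eq_getElem_cons hlt, List.getD_eq_getElem _ _ hlt]
      have hgt : ¬ head_exists_t.getD ih 0 ≤ body_t.getD 0 0 := fun hc => h ⟨hlt, hc⟩
      rw [pvMain body_t head_ts head_exists_t neg_minus1 WINDOW_SIZE RR_OFFSET 0 ih pred cnt hb0 hih hall,
        hdrop,
        pvBGo_cons _ _ _ _ _ _ _ _ _ _ _ _ _ (by simp),
        pvBGo_cons _ _ _ _ _ _ _ _ _ _ _ _ _ (by simpa using hgt)]
    · have hdrop : head_exists_t.drop ih = [] := List.drop_eq_nil_of_le (by omega)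
      rw [hdrop,
        pvAOuter_unfold _ _ _ _ _ _ _ _ _ _ hb0,
        pvAInner_stop _ _ _ _ _ _ _ _ _ _ (fun hc => hlt hc.1),
        if_pos (by omega : ih = head_exists_t.length)]
      rfl
termination_by head_exists_t.length - ih
decreasing_by omega

-- A's loops on an empty head_exists_t produce the incoming state
theorem pvAOuter_nil (body_t head_ts : List Int) (neg_minus1 : Bool)
    (WINDOW_SIZE RR_OFFSET : Int) (ib : Nat)
    (pred : PySem.Dict Int (List Int)) (cnt : Int) :
    pvAOuter body_t head_ts [] neg_minus1 WINDOW_SIZE RR_OFFSET ib 0 pred cnt = (pred, cnt) := by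
  rw [pvAOuter]
  split
  · simp [pvAInner.eq_def]
  · rfl

-- ===== VERDICT (by name: the statement is the Claim_ definition above) =====
theorem get_c_rule_scores_x_spec : Claim_unchanged_get_c_rule_scores_x := by
  intro dataset body_t head_ts head_exists_t show_ neg_minus1 x WINDOW_SIZE RR_OFFSET _ hpre
  unfold Spec_get_c_rule_scores_x get_c_rule_scores_x get_c_rule_scores_x_alt
  intro hnd
  have hall : ∀ h ∈ head_exists_t, h ≤ 10000000 := by
    intro h hm
    by_contra hc
    exact hnd ⟨h, hm, by omega⟩
  by_cases hhe : head_exists_t = []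
  · subst hhe
    have h1 : pvASkip [] (body_t.getD 0 0) 0 = 0 := by rw [pvASkip]; simp
    simp only [List.getD_eq_getElem?_getD] at h1
    rw [if_pos rfl]
    simp [h1, pvAOuter_nil]
    rfl
  · have hb : body_t ≠ [] := by
      rcases hpre with h | h
      · exact h
      · exact absurd h hhe
    have heq := pvSkipPhase body_t head_ts head_exists_t neg_minus1 WINDOW_SIZE RR_OFFSET 0
      PySem.Dict.empty 0 hb (Nat.zero_le _) hall
    simp only [List.drop_zero] at heq
    simp only [List.getD_eq_getElem?_getD] at heq
    simp [hhe, heq]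

theorem get_c_rule_scores_x_changed : Claim_changed_get_c_rule_scores_x := by
  unfold Claim_changed_get_c_rule_scores_x
  refine ⟨by decide, by decide, by decide, ?_, ?_, by decide⟩
  · show get_c_rule_scores_x 0 [5] [] [10000001] false false 7 20000000 0 = ([], 0)
    simp [get_c_rule_scores_x, pvASkip, pvAOuter, pvAInner]
    rfl
  · show get_c_rule_scores_x_alt 0 [5] [] [10000001] false false 7 20000000 0 = ([(9999996, [0, 1])], 1)
    simp [get_c_rule_scores_x_alt, pvBGo, pvBAdvance, pvBisect]
    rfl
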